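-- pv_equiv track=rewrite | github.com/forvev/optimization_algorithms | src/traveling_sales_man.py | _permutate
-- ===== SOURCE A (Python) =====
-- def _permutate(sections):
--     result = []
--     for i in range(len(sections)):
--         for j in range(len(sections)):
--             new_neighbor = sections[:]
--             new_neighbor[i], new_neighbor[j] = new_neighbor[j], new_neighbor[i]
--             result.append(new_neighbor)
--
--     # Flatten the permutations before returning
--     return [[rect for section in perm for rect in section] for perm in result]
-- ===== SOURCE B (Python) =====
-- def _permutate(sections):
--     n = len(sections)
--     # One flattened base list plus a prefix-sum offset table; each neighbor is
--     # spliced out of the base by slicing, never re-flattened.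
--     base = [r for s in sections for r in s]
--     off = [0]
--     t = 0
--     for s in sections:
--         t += len(s)
--         off.append(t)
--     result = []
--     for i in range(n):
--         for j in range(n):
--             a, b = (i, j) if i <= j else (j, i)
--             if a == b:
--                 result.append(base[:])
--             else:
--                 result.append(base[:off[a]] + sections[b]
--                               + base[off[a + 1]:off[b]] + sections[a]
--                               + base[off[b + 1]:])
--     return result
-- ===== Notes on version B (the rewrite author's own statement) =====
-- stated objective: alternative
-- what changed: B flattens the section list once and builds a prefix-sum offset table, then produces each neighbor by splicing slices of that single flat list (prefix + swapped segments + middle + suffix) instead of A's per-neighbor section-list copy followed by a full re-flatten.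
import Mathlib
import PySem

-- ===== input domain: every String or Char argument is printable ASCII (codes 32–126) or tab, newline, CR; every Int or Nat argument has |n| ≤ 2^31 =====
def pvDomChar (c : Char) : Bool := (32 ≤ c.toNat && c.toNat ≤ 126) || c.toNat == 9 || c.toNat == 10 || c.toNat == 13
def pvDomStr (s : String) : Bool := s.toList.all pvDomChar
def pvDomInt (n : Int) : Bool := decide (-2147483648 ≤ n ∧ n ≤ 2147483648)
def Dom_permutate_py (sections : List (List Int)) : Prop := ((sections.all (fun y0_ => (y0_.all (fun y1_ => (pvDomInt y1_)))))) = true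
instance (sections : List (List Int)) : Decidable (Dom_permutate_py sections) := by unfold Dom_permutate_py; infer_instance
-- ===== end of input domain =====

-- B flattens once and keeps a prefix-sum offset table, then splices each neighbor by slicing
-- the single flat base list, instead of A's per-neighbor section-list copy + full re-flatten.

-- ===== PORT A =====
-- literal port of A: for each i,j copy the section list, swap entries i and j, collect; then flatten each
def permutate_py (sections : List (List Int)) : List (List Int) :=
  let n := sections.length
  let result := (List.range n).foldl (fun acc i =>
    (List.range n).foldl (fun acc j =>
      let vi := sections.getD i []
      let vj := sections.getD j []
      let new_neighbor := (sections.set i vj).set j vi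
      acc ++ [new_neighbor]) acc) []
  result.map (fun perm => perm.foldl (fun a s => a ++ s) [])

-- ===== PORT B =====
-- literal port of Source B; Python slices base[:x], base[x:y], base[x:] are ported as
-- take/drop, exact here because the offsets satisfy 0 ≤ off[a] ≤ off[b] ≤ len(base)
def permutate_py_alt (sections : List (List Int)) : List (List Int) :=
  let n := sections.length
  let base := sections.flatMap (fun s => s)
  let off := (sections.foldl (fun (st : Nat × List Nat) s =>
      (st.1 + s.length, st.2 ++ [st.1 + s.length])) (0, [0])).2
  (List.range n).foldl (fun res i =>
    (List.range n).foldl (fun res j =>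
      let a := if i ≤ j then i else j
      let b := if i ≤ j then j else i
      let nb :=
        if a = b then base
        else base.take (off.getD a 0) ++ sections.getD b []
          ++ ((base.take (off.getD b 0)).drop (off.getD (a + 1) 0)) ++ sections.getD a []
          ++ base.drop (off.getD (b + 1) 0)
      res ++ [nb]) res) []

-- ===== PRECONDITION & SPEC =====
def Spec_permutate_py (sections : List (List Int)) (out : List (List Int)) : Prop := out = permutate_py_alt sections
instance (sections : List (List Int)) (out : List (List Int)) : Decidable (Spec_permutate_py sections out) := by unfold Spec_permutate_py; infer_instance

-- ===== CLAIM (what is proved, stated in full; the proofs are below) =====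
def Claim_equal_permutate_py : Prop := ∀ (sections : List (List Int)), Dom_permutate_py sections → Spec_permutate_py sections (permutate_py sections)

-- ===== LEMMAS AND PROOFS =====

-- the nested append-singleton double fold is init ++ a flatMap/map table
theorem pv_double_fold {α : Type} (l₁ l₂ : List Nat) (g : Nat → Nat → α) (init : List α) :
    l₁.foldl (fun acc i => l₂.foldl (fun acc j => acc ++ [g i j]) acc) init
      = init ++ l₁.flatMap (fun i => l₂.map (g i)) := by
  have h : (fun (acc : List α) i => l₂.foldl (fun acc j => acc ++ [g i j]) acc)
      = (fun acc i => acc ++ l₂.map (g i)) := by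
    funext acc i
    rw [PySem.List.foldl_append_singleton_eq_map]
  rw [h, PySem.List.foldl_append_eq_flatMap]

-- the offset fold computes the prefix-sum table of flattened-prefix lengths
theorem pv_off_fold (l : List (List Int)) (t0 : Nat) (acc : List Nat) :
    (l.foldl (fun (st : Nat × List Nat) s =>
        (st.1 + s.length, st.2 ++ [st.1 + s.length])) (t0, acc)).2
      = acc ++ (List.range l.length).map (fun k => t0 + ((l.take (k + 1)).flatten).length) := by
  induction l generalizing t0 acc with
  | nil => simp
  | cons a t ih =>
      simp only [List.foldl_cons, ih, List.length_cons, List.range_succ_eq_map,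
        List.map_cons, List.map_map]
      simp [Function.comp_def, List.append_assoc, Nat.add_assoc]

theorem pv_off_getD (s : List (List Int)) (k : Nat) (hk : k ≤ s.length) :
    ((s.foldl (fun (st : Nat × List Nat) x =>
        (st.1 + x.length, st.2 ++ [st.1 + x.length])) (0, [0])).2).getD k 0
      = ((s.take k).flatten).length := by
  rw [pv_off_fold s 0 [0]]
  cases k with
  | zero => simp
  | succ m =>
      have hm : m < s.length := by omega
      simp only [Nat.zero_add, List.singleton_append, List.getD_cons_succ]
      rw [List.getD_eq_getElem?_getD, List.getElem?_map, List.getElem?_range hm]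
      simp

-- flatten of a prefix is a take of the flatten at the section boundary
theorem pv_flatten_take (s : List (List Int)) (k : Nat) :
    s.flatten.take ((s.take k).flatten).length = (s.take k).flatten := by
  have hsplit : s.flatten = (s.take k).flatten ++ (s.drop k).flatten := by
    rw [← List.flatten_append, List.take_append_drop]
  rw [hsplit]
  exact List.take_left

theorem pv_flatten_drop (s : List (List Int)) (k : Nat) :
    s.flatten.drop ((s.take k).flatten).length = (s.drop k).flatten := by
  have hsplit : s.flatten = (s.take k).flatten ++ (s.drop k).flatten := by
    rw [← List.flatten_append, List.take_append_drop]
  rw [hsplit]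
  exact List.drop_left

-- the swapped list written as five segments (a < b, both in range)
theorem pv_swap_decomp (s : List (List Int)) (a b : Nat) (hab : a < b) (hb : b < s.length) :
    (s.set a (s.getD b [])).set b (s.getD a [])
      = s.take a ++ [s.getD b []] ++ ((s.take b).drop (a + 1)) ++ [s.getD a []] ++ s.drop (b + 1) := by
  have ha : a < s.length := lt_trans hab hb
  have hbs : b < (s.set a (s.getD b [])).length := by simpa using hb
  rw [List.set_eq_take_append_cons_drop, if_pos hbs]
  have h1 : (s.set a (s.getD b [])).take b = (s.take b).set a (s.getD b []) := List.take_set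
  have h2 : (s.set a (s.getD b [])).drop (b + 1) = s.drop (b + 1) := by
    rw [List.drop_set, if_pos (by omega : a < b + 1)]
  have ha' : a < (s.take b).length := by
    simp only [List.length_take]; omega
  rw [h1, h2, List.set_eq_take_append_cons_drop, if_pos ha', List.take_take,
    Nat.min_eq_left (Nat.le_of_lt hab)]
  simp [List.append_assoc]

-- one neighbor, i ≠ j with a = min, b = max: A's flatten of the swap equals B's splice
theorem pv_neighbor_ne (s : List (List Int)) (a b : Nat) (hab : a < b) (hb : b < s.length) :
    ((s.set a (s.getD b [])).set b (s.getD a [])).flatten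
      = s.flatten.take (((s.take a).flatten).length) ++ s.getD b []
        ++ ((s.flatten.take (((s.take b).flatten).length)).drop (((s.take (a + 1)).flatten).length))
        ++ s.getD a [] ++ s.flatten.drop (((s.take (b + 1)).flatten).length) := by
  rw [pv_swap_decomp s a b hab hb]
  rw [pv_flatten_take, pv_flatten_take, pv_flatten_drop]
  have hmid : ((s.take b).flatten).drop (((s.take (a + 1)).flatten).length)
      = ((s.take b).drop (a + 1)).flatten := by
    have h := pv_flatten_drop (s.take b) (a + 1)
    rw [List.take_take, Nat.min_eq_left (Nat.succ_le_of_lt hab)] at h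
    exact h
  rw [hmid]
  simp [List.flatten_append, List.append_assoc]

-- i = j case: the double set is the identity
theorem pv_set_self (s : List (List Int)) (i : Nat) (hi : i < s.length) :
    (s.set i (s.getD i [])).set i (s.getD i []) = s := by
  have : s.getD i [] = s[i] := by
    rw [List.getD_eq_getElem?_getD, List.getElem?_eq_getElem hi]; rfl
  rw [this, List.set_set, List.set_getElem_self]

-- the swap is symmetric in i and j
theorem pv_swap_comm (s : List (List Int)) (i j : Nat) (hij : i ≠ j) :
    (s.set i (s.getD j [])).set j (s.getD i [])
      = (s.set j (s.getD i [])).set i (s.getD j []) :=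
  List.set_comm (s.getD j []) (s.getD i []) hij

-- ===== VERDICT (by name: the statement is the Claim_ definition above) =====
theorem permutate_py_spec : Claim_equal_permutate_py := by
  unfold Claim_equal_permutate_py
  intro sections _
  unfold Spec_permutate_py permutate_py permutate_py_alt
  simp only []
  rw [pv_double_fold, pv_double_fold]
  simp only [List.nil_append, List.map_flatMap, List.map_map]
  apply List.flatMap_congr
  intro i hi
  apply List.map_congr_left
  intro j hj
  have hi' : i < sections.length := List.mem_range.mp hi
  have hj' : j < sections.length := List.mem_range.mp hj
  show ((sections.set i (sections.getD j [])).set j (sections.getD i [])).foldl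
      (fun a s => a ++ s) [] = _
  rw [PySem.List.foldl_append_eq_flatten, List.nil_append]
  by_cases hij : i = j
  · subst hij
    simp only [le_refl, if_true]
    rw [pv_set_self sections i hi']
    exact List.flatMap_id'.symm
  · have hmem : ∀ k, k ≤ sections.length →
        (((sections.foldl (fun (st : Nat × List Nat) x =>
          (st.1 + x.length, st.2 ++ [st.1 + x.length])) (0, [0])).2).getD k 0)
          = ((sections.take k).flatten).length := fun k hk => pv_off_getD sections k hk
    by_cases hle : i ≤ j
    · have hlt : i < j := lt_of_le_of_ne hle hij
      simp only [if_pos hle, if_neg hij]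
      rw [hmem i (Nat.le_of_lt hi'), hmem j (Nat.le_of_lt hj'),
        hmem (i + 1) (Nat.succ_le_of_lt hi'), hmem (j + 1) (Nat.succ_le_of_lt hj')]
      rw [List.flatMap_id']
      exact pv_neighbor_ne sections i j hlt hj'
    · have hlt : j < i := Nat.lt_of_not_le hle
      have hji : ¬ (j = i) := fun h => hij h.symm
      simp only [if_neg hle, if_neg hji]
      rw [hmem j (Nat.le_of_lt hj'), hmem i (Nat.le_of_lt hi'),
        hmem (j + 1) (Nat.succ_le_of_lt hj'), hmem (i + 1) (Nat.succ_le_of_lt hi')]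
      rw [List.flatMap_id', pv_swap_comm sections i j hij]
      exact pv_neighbor_ne sections j i hlt hi'
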